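-- pv_equiv track=rewrite | github.com/alexfdez1010/paperhound | src/paperhound/search/_pubtype.py | to_openalex_filter
-- ===== SOURCE A (Python) =====
-- _OPENALEX_PUSHDOWN: dict[str, tuple[str, ...]] = {
--     "journal": ("article",),
--     "conference": ("article",),
--     "preprint": ("preprint",),
--     "book": ("book", "book-chapter"),
--     "other": (
--         "dataset",
--         "dissertation",
--         "report",
--         "standard",
--         "editorial",
--         "letter",
--         "erratum",
--         "review",
--         "paratext",
--         "other",
--     ),
-- }
--
-- def to_openalex_filter(types: frozenset[str] | None) -> str | None:
--     """Build an OpenAlex ``type:`` filter value for the given normalized set.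
--
--     Returns ``None`` when push-down is not safe (e.g. ``preprint`` is in the
--     set but OpenAlex's "article" already overlaps with peer-reviewed work).
--     """
--     if not types:
--         return None
--     out: set[str] = set()
--     for t in types:
--         mapped = _OPENALEX_PUSHDOWN.get(t)
--         if not mapped:
--             return None
--         out.update(mapped)
--     return "|".join(sorted(out)) if out else None
-- ===== SOURCE B (Python) =====
-- _OPENALEX_PUSHDOWN: dict[str, tuple[str, ...]] = {
--     "journal": ("article",),
--     "conference": ("article",),
--     "preprint": ("preprint",),
--     "book": ("book", "book-chapter"),
--     "other": (
--         "dataset",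
--         "dissertation",
--         "report",
--         "standard",
--         "editorial",
--         "letter",
--         "erratum",
--         "review",
--         "paratext",
--         "other",
--     ),
-- }
--
--
-- def to_openalex_filter(types):
--     """Build an OpenAlex ``type:`` filter value for the given normalized set.
--
--     Table-driven: iterate the FIXED mapping (not the input), pick up the
--     values of every key present in the input, and record which input types
--     were covered; the request is pushable iff the covered set is the whole
--     input set.
--     """
--     if not types:
--         return None
--     wanted = set(types)
--     out = []
--     covered = set()
--     for key, vals in _OPENALEX_PUSHDOWN.items():
--         if key in wanted:
--             covered.add(key)
--             out.extend(vals)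
--     if covered != wanted:
--         return None
--     return "|".join(sorted(set(out)))
-- ===== Notes on version B (the rewrite author's own statement) =====
-- stated objective: alternative
-- what changed: Inverts the traversal: instead of iterating the input set with a dict lookup and an in-loop early return per element, B makes one pass over the fixed mapping table, testing each table key for membership in the input, accumulating the mapped values and the set of covered input types, and validates with a single covered-set == input-set comparison at the end.
import Mathlib
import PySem

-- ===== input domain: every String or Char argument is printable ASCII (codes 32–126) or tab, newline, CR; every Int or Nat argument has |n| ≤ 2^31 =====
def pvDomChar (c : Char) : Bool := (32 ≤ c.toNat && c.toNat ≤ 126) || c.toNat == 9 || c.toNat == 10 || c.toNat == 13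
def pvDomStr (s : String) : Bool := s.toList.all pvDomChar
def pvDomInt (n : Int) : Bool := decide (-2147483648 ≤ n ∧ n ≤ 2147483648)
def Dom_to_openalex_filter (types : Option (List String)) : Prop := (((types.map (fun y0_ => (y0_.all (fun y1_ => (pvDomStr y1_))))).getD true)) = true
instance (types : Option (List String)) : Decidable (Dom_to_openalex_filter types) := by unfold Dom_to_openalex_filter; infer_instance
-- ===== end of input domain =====

-- B inverts the traversal: one pass over the fixed mapping table with membership tests into the
-- input set and a final covered-set comparison, instead of A's input-driven loop with dict lookups
-- and an in-loop early return; same cost.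

-- the module constant _OPENALEX_PUSHDOWN, as a pair list (tuples ported as lists)
def pvTable : List (String × List String) := [
  ("journal", ["article"]),
  ("conference", ["article"]),
  ("preprint", ["preprint"]),
  ("book", ["book", "book-chapter"]),
  ("other", ["dataset", "dissertation", "report", "standard", "editorial",
             "letter", "erratum", "review", "paratext", "other"])]

def pvPushdown : PySem.Dict String (List String) := PySem.Dict.ofList pvTable

-- ===== PORT A =====
-- the 'for t in types' loop with its early 'return None'
def pvALoop : List String → PySem.Set String → Option (PySem.Set String)
  | [], out => some out
  | t :: rest, out =>
    match pvPushdown.get? t with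
    | none => none
    | some mapped => if mapped = [] then none else pvALoop rest (PySem.Set.update out mapped)

def to_openalex_filter (types : Option (List String)) : Option String :=
  match types with
  | none => none
  | some ts =>
    if ts = [] then none
    else
      match pvALoop ts PySem.Set.empty with
      | none => none
      | some out =>
        if out = [] then none
        else some (PySem.Str.join "|" (PySem.List.sorted out (fun x => x) false))

-- ===== PORT B =====
-- the 'for key, vals in _OPENALEX_PUSHDOWN.items()' loop, state = (out, covered)
def pvBLoop (wanted : PySem.Set String) : List (String × List String) →
    List String × PySem.Set String → List String × PySem.Set String
  | [], acc => acc
  | kv :: rest, acc =>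
    if PySem.Set.contains wanted kv.1 then
      pvBLoop wanted rest (acc.1 ++ kv.2, PySem.Set.add acc.2 kv.1)
    else
      pvBLoop wanted rest acc

def to_openalex_filter_alt (types : Option (List String)) : Option String :=
  match types with
  | none => none
  | some ts =>
    if ts = [] then none
    else
      let wanted : PySem.Set String := PySem.Set.ofList ts
      let r := pvBLoop wanted pvPushdown.items ([], PySem.Set.empty)
      if PySem.Set.equal r.2 wanted then
        some (PySem.Str.join "|" (PySem.List.sorted (PySem.Set.ofList r.1) (fun x => x) false))
      else none

-- ===== PRECONDITION & SPEC =====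
def Spec_to_openalex_filter (types : Option (List String)) (out : Option String) : Prop := out = to_openalex_filter_alt types
instance (types : Option (List String)) (out : Option String) : Decidable (Spec_to_openalex_filter types out) := by unfold Spec_to_openalex_filter; infer_instance

-- ===== CLAIM =====
def Claim_equal_to_openalex_filter : Prop := ∀ (types : Option (List String)), Dom_to_openalex_filter types → Spec_to_openalex_filter types (to_openalex_filter types)

-- ===== LEMMAS AND PROOFS =====

theorem pv_items_eq : pvPushdown.items = pvTable := by decide

-- every value stored in the dict is a nonempty list
theorem pv_mapped_ne_nil : ∀ t, ∀ m, pvPushdown.get? t = some m → m ≠ [] := by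
  intro t m h
  have hmem : (t, m) ∈ pvPushdown.items := PySem.Dict.mem_items_of_get?_eq_some _ h
  rw [pv_items_eq] at hmem
  simp only [pvTable, List.mem_cons, List.not_mem_nil, or_false, Prod.mk.injEq] at hmem
  rcases hmem with ⟨_, rfl⟩ | ⟨_, rfl⟩ | ⟨_, rfl⟩ | ⟨_, rfl⟩ | ⟨_, rfl⟩ <;> simp

theorem pv_loop_eq (ts : List String) (s : PySem.Set String) :
    pvALoop ts s =
      if ∀ t ∈ ts, t ∈ pvPushdown.keys then
        some (ts.foldl (fun s t => PySem.Set.update s (pvPushdown.getD t [])) s)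
      else none := by
  induction ts generalizing s with
  | nil => simp [pvALoop]
  | cons t rest ih =>
    by_cases hmem : t ∈ pvPushdown.keys
    · have hk : pvPushdown.contains t = true := (PySem.Dict.contains_iff_mem_keys _ _).mpr hmem
      have hg : (pvPushdown.get? t).isSome := by
        rw [← PySem.Dict.contains_eq_isSome_get?]; exact hk
      obtain ⟨m, hm⟩ := Option.isSome_iff_exists.mp hg
      have hne := pv_mapped_ne_nil t m hm
      have hgD : pvPushdown.getD t [] = m := by
        simp [PySem.Dict.getD_eq_get?_getD, hm]
      simp only [pvALoop, hm, if_neg hne, ih, List.foldl_cons, hgD]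
      by_cases hall : ∀ u ∈ rest, u ∈ pvPushdown.keys
      · simp [hmem]
      · have hcons : ¬ ∀ u ∈ t :: rest, u ∈ pvPushdown.keys := by
          intro h; exact hall fun u hu => h u (List.mem_cons_of_mem _ hu)
        simp [hall]
    · have hg : pvPushdown.get? t = none := by
        have : pvPushdown.contains t = false := by
          by_contra h
          exact hmem ((PySem.Dict.contains_iff_mem_keys _ _).mp (by simpa using h))
        rw [PySem.Dict.contains_eq_isSome_get?] at this
        exact Option.not_isSome_iff_eq_none.mp (by simp [this])
      simp [pvALoop, hg, hmem]

-- membership in B's loop state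
theorem pv_bloop_mem (wanted : PySem.Set String) (tbl : List (String × List String))
    (acc : List String × PySem.Set String) :
    (∀ x, x ∈ (pvBLoop wanted tbl acc).1 ↔
        x ∈ acc.1 ∨ ∃ kv ∈ tbl, kv.1 ∈ wanted ∧ x ∈ kv.2) ∧
    (∀ x, x ∈ (pvBLoop wanted tbl acc).2 ↔
        x ∈ acc.2 ∨ ∃ kv ∈ tbl, kv.1 = x ∧ kv.1 ∈ wanted) := by
  induction tbl generalizing acc with
  | nil => simp [pvBLoop]
  | cons kv rest ih =>
    by_cases h : kv.1 ∈ wanted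
    · have hc : PySem.Set.contains wanted kv.1 = true := (PySem.Set.contains_iff _ _).mpr h
      simp only [pvBLoop, hc, if_pos]
      constructor
      · intro x
        rw [(ih _).1 x]
        simp only [List.mem_append, List.mem_cons]
        constructor
        · rintro (⟨hx | hx⟩ | ⟨k, hk, hw, hx⟩)
          · exact Or.inl hx
          · exact Or.inr ⟨kv, Or.inl rfl, h, hx⟩
          · exact Or.inr ⟨k, Or.inr hk, hw, hx⟩
        · rintro (hx | ⟨k, hk | hk, hw, hx⟩)
          · exact Or.inl (Or.inl hx)
          · exact Or.inl (Or.inr (hk ▸ hx))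
          · exact Or.inr ⟨k, hk, hw, hx⟩
      · intro x
        rw [(ih _).2 x]
        simp only [PySem.Set.mem_add, List.mem_cons]
        constructor
        · rintro (⟨hx | hx⟩ | ⟨k, hk, he, hw⟩)
          · exact Or.inl hx
          · exact Or.inr ⟨kv, Or.inl rfl, hx.symm, h⟩
          · exact Or.inr ⟨k, Or.inr hk, he, hw⟩
        · rintro (hx | ⟨k, hk | hk, he, hw⟩)
          · exact Or.inl (Or.inl hx)
          · exact Or.inl (Or.inr (hk ▸ he).symm)
          · exact Or.inr ⟨k, hk, he, hw⟩
    · have hc : PySem.Set.contains wanted kv.1 = false := by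
        by_contra hcc
        exact h ((PySem.Set.contains_iff _ _).mp (by simpa using hcc))
      simp only [pvBLoop, hc, Bool.false_eq_true, if_false]
      constructor
      · intro x
        rw [(ih _).1 x]
        simp only [List.mem_cons]
        constructor
        · rintro (hx | ⟨k, hk, hw, hx⟩)
          · exact Or.inl hx
          · exact Or.inr ⟨k, Or.inr hk, hw, hx⟩
        · rintro (hx | ⟨k, hk | hk, hw, hx⟩)
          · exact Or.inl hx
          · exact absurd (hk ▸ hw) h
          · exact Or.inr ⟨k, hk, hw, hx⟩
      · intro x
        rw [(ih _).2 x]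
        simp only [List.mem_cons]
        constructor
        · rintro (hx | ⟨k, hk, he, hw⟩)
          · exact Or.inl hx
          · exact Or.inr ⟨k, Or.inr hk, he, hw⟩
        · rintro (hx | ⟨k, hk | hk, he, hw⟩)
          · exact Or.inl hx
          · exact absurd (hk ▸ hw) h
          · exact Or.inr ⟨k, hk, he, hw⟩

theorem pv_update_ne_nil (s : PySem.Set String) (xs : List String) (h : s ≠ []) :
    PySem.Set.update s xs ≠ [] := by
  rw [PySem.Set.update_eq_append_filter]
  simp [h]

theorem pv_foldl_ne_nil (ts : List String) (s : PySem.Set String) (h : s ≠ []) :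
    ts.foldl (fun s t => PySem.Set.update s (pvPushdown.getD t [])) s ≠ [] := by
  induction ts generalizing s with
  | nil => simpa
  | cons t rest ih => exact ih _ (pv_update_ne_nil _ _ h)

theorem pv_foldl_nodup (ts : List String) (s : PySem.Set String) (h : s.Nodup) :
    (ts.foldl (fun s t => PySem.Set.update s (pvPushdown.getD t [])) s).Nodup := by
  induction ts generalizing s with
  | nil => simpa
  | cons t rest ih => exact ih _ (PySem.Set.nodup_update _ _ h)

theorem pv_mem_foldl (ts : List String) (s : PySem.Set String) (x : String) :
    x ∈ ts.foldl (fun s t => PySem.Set.update s (pvPushdown.getD t [])) s ↔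
      x ∈ s ∨ ∃ t ∈ ts, x ∈ pvPushdown.getD t [] := by
  induction ts generalizing s with
  | nil => simp
  | cons t rest ih =>
    rw [List.foldl_cons, ih, PySem.Set.mem_update]
    constructor
    · rintro (⟨hx | hx⟩ | ⟨u, hu, hx⟩)
      · exact Or.inl hx
      · exact Or.inr ⟨t, List.mem_cons_self, hx⟩
      · exact Or.inr ⟨u, List.mem_cons_of_mem _ hu, hx⟩
    · rintro (hx | ⟨u, hu, hx⟩)
      · exact Or.inl (Or.inl hx)
      · rcases List.mem_cons.mp hu with rfl | hu
        · exact Or.inl (Or.inr hx)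
        · exact Or.inr ⟨u, hu, hx⟩

theorem pv_key_of_mem_table : ∀ kv ∈ pvTable, kv.1 ∈ pvPushdown.keys := by decide

-- ===== VERDICT =====
theorem to_openalex_filter_spec : Claim_equal_to_openalex_filter := by
  intro types _
  unfold Spec_to_openalex_filter to_openalex_filter to_openalex_filter_alt
  match types with
  | none => rfl
  | some ts =>
    by_cases hnil : ts = []
    · simp [hnil]
    · simp only [if_neg hnil]
      have hmemB := pv_bloop_mem (PySem.Set.ofList ts) pvPushdown.items ([], PySem.Set.empty)
      by_cases hall : ∀ t ∈ ts, t ∈ pvPushdown.keys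
      · -- all input types valid: both return the joined sorted union
        -- covered = wanted
        have hcov : PySem.Set.equal
            (pvBLoop (PySem.Set.ofList ts) pvPushdown.items ([], PySem.Set.empty)).2
            (PySem.Set.ofList ts) = true := by
          rw [PySem.Set.equal_iff]
          intro x
          rw [(hmemB.2 x), PySem.Set.mem_ofList]
          constructor
          · rintro (hx | ⟨kv, _, rfl, hw⟩)
            · exact absurd hx (List.not_mem_nil)
            · exact (PySem.Set.mem_ofList _ _).mp hw
          · intro hx
            have hk := hall x hx
            have hc : pvPushdown.contains x = true := (PySem.Dict.contains_iff_mem_keys _ _).mpr hk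
            have hg : (pvPushdown.get? x).isSome := by
              rw [← PySem.Dict.contains_eq_isSome_get?]; exact hc
            obtain ⟨m, hm⟩ := Option.isSome_iff_exists.mp hg
            have : (x, m) ∈ pvPushdown.items := PySem.Dict.mem_items_of_get?_eq_some _ hm
            exact Or.inr ⟨(x, m), this, rfl, (PySem.Set.mem_ofList _ _).mpr hx⟩
        rw [pv_loop_eq, if_pos hall]
        -- A's accumulated set is nonempty
        obtain ⟨t, rest, rfl⟩ := List.exists_cons_of_ne_nil hnil
        have hk : pvPushdown.contains t = true :=
          (PySem.Dict.contains_iff_mem_keys _ _).mpr (hall t (List.mem_cons_self))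
        have hg : (pvPushdown.get? t).isSome := by
          rw [← PySem.Dict.contains_eq_isSome_get?]; exact hk
        obtain ⟨m, hm⟩ := Option.isSome_iff_exists.mp hg
        have hne := pv_mapped_ne_nil t m hm
        have hgD : pvPushdown.getD t [] = m := by
          simp [PySem.Dict.getD_eq_get?_getD, hm]
        have hstart : PySem.Set.update PySem.Set.empty (pvPushdown.getD t []) ≠ [] := by
          rw [hgD]
          obtain ⟨x, xs, rfl⟩ := List.exists_cons_of_ne_nil hne
          show PySem.Set.update [] (x :: xs) ≠ []
          rw [PySem.Set.update_nil_left, PySem.Set.ofList_cons]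
          exact List.cons_ne_nil _ _
        have hout : List.foldl (fun s t => PySem.Set.update s (pvPushdown.getD t []))
            PySem.Set.empty (t :: rest) ≠ [] := by
          rw [List.foldl_cons]
          exact pv_foldl_ne_nil rest _ hstart
        -- the two sorted lists agree: same members, both Nodup
        have hperm : (List.foldl (fun s t => PySem.Set.update s (pvPushdown.getD t []))
              PySem.Set.empty (t :: rest)).Perm
            (PySem.Set.ofList
              (pvBLoop (PySem.Set.ofList (t :: rest)) pvPushdown.items ([], PySem.Set.empty)).1) := by
          rw [List.perm_ext_iff_of_nodup (pv_foldl_nodup _ _ (by simp [PySem.Set.empty]))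
            (PySem.Set.nodup_ofList _)]
          intro x
          rw [pv_mem_foldl, PySem.Set.mem_ofList, (hmemB.1 x)]
          constructor
          · rintro (hx | ⟨u, hu, hx⟩)
            · exact absurd hx (List.not_mem_nil)
            · have hk' : pvPushdown.contains u = true :=
                (PySem.Dict.contains_iff_mem_keys _ _).mpr (hall u hu)
              have hg' : (pvPushdown.get? u).isSome := by
                rw [← PySem.Dict.contains_eq_isSome_get?]; exact hk'
              obtain ⟨m', hm'⟩ := Option.isSome_iff_exists.mp hg'
              have hgD' : pvPushdown.getD u [] = m' := by
                simp [PySem.Dict.getD_eq_get?_getD, hm']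
              exact Or.inr ⟨(u, m'), PySem.Dict.mem_items_of_get?_eq_some _ hm',
                (PySem.Set.mem_ofList _ _).mpr hu, hgD' ▸ hx⟩
          · rintro (hx | ⟨⟨k, v⟩, hkv, hw, hx⟩)
            · exact absurd hx (List.not_mem_nil)
            · have hnk : pvPushdown.keys.Nodup := by decide
              have hg' : pvPushdown.get? k = some v :=
                PySem.Dict.get?_of_mem_items _ hkv hnk
              have hgD' : pvPushdown.getD k [] = v := by
                simp [PySem.Dict.getD_eq_get?_getD, hg']
              exact Or.inr ⟨k, (PySem.Set.mem_ofList _ _).mp hw, hgD' ▸ hx⟩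
        have hsorted := PySem.List.sorted_eq_sorted_of_perm _ _ (fun x => x)
          (fun a b h => h) hperm
        simp only [hcov, if_pos, hout, if_neg, not_false_iff, hsorted]
      · -- some input type is not a dict key: both return none
        obtain ⟨t, ht, hnk⟩ : ∃ t ∈ ts, t ∉ pvPushdown.keys := by
          by_contra h
          exact hall fun u hu => by
            by_contra hk
            exact h ⟨u, hu, hk⟩
        have hcov : PySem.Set.equal
            (pvBLoop (PySem.Set.ofList ts) pvPushdown.items ([], PySem.Set.empty)).2
            (PySem.Set.ofList ts) = false := by
          apply Bool.eq_false_iff.mpr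
          intro h
          have heq := (PySem.Set.equal_iff _ _).mp h
          have := ((heq t).mpr ((PySem.Set.mem_ofList _ _).mpr ht))
          rcases (hmemB.2 t).mp this with hx | ⟨kv, hkv, rfl, _⟩
          · exact absurd hx (List.not_mem_nil)
          · exact hnk (pv_key_of_mem_table kv (pv_items_eq ▸ hkv))
        rw [pv_loop_eq, if_neg hall]
        simp only [hcov, Bool.false_eq_true, if_false]
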